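-- pv_equiv track=rewrite | github.com/jimmypuntoexe/prosvisio_assignment1 | check_functions.py | check_nome
-- ===== SOURCE A (Python) =====
-- def check_nome(nome):
--     """Check if a name is valid"""
--     if not nome:
--         return False
--     for i in range(0, len(nome)):
--         if (not(nome[i] >= 'a' and nome[i] <= 'z') \
--             and not (nome[i] >= 'A' and nome[i] <= 'Z') \
--             and not nome[i] == ' '):
--             return False
--
--     return True
-- ===== SOURCE B (Python) =====
-- import re
--
-- def check_nome(nome):
--     """Check if a name is valid"""
--     return bool(re.fullmatch(r'[A-Za-z ]+', nome))
-- ===== Notes on version B (the rewrite author's own statement) =====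
-- stated objective: idiomatic
-- what changed: Replaced the explicit index loop with early returns by a single regex fullmatch against [A-Za-z ]+, whose + quantifier also covers the empty-string case.
import Mathlib
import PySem

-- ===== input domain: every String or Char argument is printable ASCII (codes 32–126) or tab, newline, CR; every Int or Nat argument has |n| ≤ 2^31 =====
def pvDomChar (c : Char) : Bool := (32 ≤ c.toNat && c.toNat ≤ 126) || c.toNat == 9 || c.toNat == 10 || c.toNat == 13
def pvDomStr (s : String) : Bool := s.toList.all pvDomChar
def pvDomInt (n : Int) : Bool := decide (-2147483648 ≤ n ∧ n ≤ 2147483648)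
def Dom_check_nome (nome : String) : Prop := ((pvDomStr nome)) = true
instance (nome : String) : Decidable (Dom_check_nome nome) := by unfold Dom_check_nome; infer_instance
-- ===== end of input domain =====

-- ===== PORT A =====
-- literal port of A: early check for empty, then index loop with early False return
def check_nome_loop : List Char → Bool
  | [] => true
  | c :: rest =>
    if (!(('a' ≤ c) && (c ≤ 'z'))) && (!(('A' ≤ c) && (c ≤ 'Z'))) && (!(c == ' ')) then false
    else check_nome_loop rest

def check_nome (nome : String) : Bool :=
  if nome.toList.isEmpty then false
  else check_nome_loop nome.toList

-- ===== PORT B =====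
-- port of B: re.fullmatch(r'[A-Za-z ]+', nome) ported as nonempty ∧ all chars in the class
def check_nome_alt (nome : String) : Bool :=
  (!nome.toList.isEmpty) && nome.toList.all (fun c => (('A' ≤ c) && (c ≤ 'Z')) || (('a' ≤ c) && (c ≤ 'z')) || (c == ' '))

-- ===== PRECONDITION & SPEC =====
def Spec_check_nome (nome : String) (out : Bool) : Prop := out = check_nome_alt nome
instance (nome : String) (out : Bool) : Decidable (Spec_check_nome nome out) := by unfold Spec_check_nome; infer_instance

-- ===== CLAIM (what is proved, stated in full; the proofs are below) =====
def Claim_equal_check_nome : Prop := ∀ (nome : String), Dom_check_nome nome → Spec_check_nome nome (check_nome nome)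

-- ===== LEMMAS AND PROOFS =====

-- ===== VERDICT (by name: the statement is the Claim_ definition above) =====
theorem char_class_eq (c : Char) :
    ((!(('a' ≤ c) && (c ≤ 'z'))) && (!(('A' ≤ c) && (c ≤ 'Z'))) && (!(c == ' ')))
      = !((('A' ≤ c) && (c ≤ 'Z')) || (('a' ≤ c) && (c ≤ 'z')) || (c == ' ')) := by
  simp only [Bool.not_or]
  cases decide ('a' ≤ c) <;> cases decide (c ≤ 'z') <;> cases decide ('A' ≤ c) <;>
    cases decide (c ≤ 'Z') <;> cases (c == ' ') <;> rfl

theorem loop_eq_all (l : List Char) :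
    check_nome_loop l = l.all (fun c => (('A' ≤ c) && (c ≤ 'Z')) || (('a' ≤ c) && (c ≤ 'z')) || (c == ' ')) := by
  induction l with
  | nil => rfl
  | cons c rest ih =>
    simp only [check_nome_loop, List.all_cons, ih, char_class_eq]
    cases h : ((('A' ≤ c) && (c ≤ 'Z')) || (('a' ≤ c) && (c ≤ 'z')) || (c == ' ')) <;> simp [h]

theorem check_nome_spec : Claim_equal_check_nome := by
  intro nome _
  unfold Spec_check_nome check_nome check_nome_alt
  rw [loop_eq_all]
  cases nome.toList <;> simp
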